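-- pv_equiv track=rewrite | github.com/stenknutsen/HomeGrownPOSTagger | PhaseThreeTagging.py | V_to_PUNC_TOTagger
-- ===== SOURCE A (Python) =====
-- def V_to_PUNC_TOTagger(sent):
--     sentToReturn = []
--     skip = 0
--
--     for i in range(len(sent)):
--
--         if skip>0:
--             skip = skip -1
--             continue
--
--         if (i)<0 | (i+2)>=len(sent):
--             sentToReturn += [sent[i]]
--             continue
--
--         leftContext = sent[i]
--         target = sent[i+1]
--         rightContext = sent[i+2]
--
--         if (leftContext[1].startswith("V"))&((target[1]=="UNK")&(target[0].lower()=="to"))&(rightContext[1]=="."):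
--
--             sentToReturn += [leftContext]
--             sentToReturn += [(target[0],"TO")]
--             sentToReturn += [rightContext]
--             skip = 2
--
--         else:
--             sentToReturn += [leftContext]
--
--     return sentToReturn
-- ===== SOURCE B (Python) =====
-- def V_to_PUNC_TOTagger(sent):
--     # Stateless windowed pass: each output token depends only on its own neighbors.
--     pad = ("", "")
--     out = []
--     for prev, cur, nxt in zip([pad] + sent, sent, sent[1:] + [pad]):
--         if prev[1].startswith("V") and cur[1] == "UNK" and cur[0].lower() == "to" and nxt[1] == ".":
--             out.append((cur[0], "TO"))
--         else:
--             out.append(cur)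
--     return out
-- ===== Notes on version B (the rewrite author's own statement) =====
-- stated objective: simpler
-- what changed: Replaced A's skip-counter state machine that emits one or three tokens per iteration with a stateless windowed pass (zip of the padded previous/current/next token streams) that decides each output token from its own neighbors only.
import Mathlib
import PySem

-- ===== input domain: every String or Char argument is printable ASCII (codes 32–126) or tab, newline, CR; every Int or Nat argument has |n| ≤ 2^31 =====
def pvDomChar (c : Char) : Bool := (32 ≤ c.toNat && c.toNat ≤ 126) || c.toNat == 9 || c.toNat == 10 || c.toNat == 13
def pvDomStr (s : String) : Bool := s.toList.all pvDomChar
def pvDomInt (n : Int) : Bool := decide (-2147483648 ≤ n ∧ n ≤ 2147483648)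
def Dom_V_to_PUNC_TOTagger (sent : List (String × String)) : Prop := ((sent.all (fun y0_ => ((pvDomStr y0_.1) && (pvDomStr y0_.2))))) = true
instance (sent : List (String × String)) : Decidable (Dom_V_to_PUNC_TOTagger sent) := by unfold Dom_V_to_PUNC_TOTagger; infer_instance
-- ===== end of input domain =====

-- B replaces A's skip-counter state machine by a stateless neighbor-window pass (objective: simpler).

-- ===== PORT A =====
-- default for the always-in-range indexing sent[i] / sent[i+1] / sent[i+2] (guarded by the bounds test)
def pvPad : String × String := ("", "")

-- one iteration of A's loop; state = (sentToReturn, skip).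
-- Python's '(i)<0 | (i+2)>=len(sent)' is the chained comparison i < (0 | (i+2)) >= len(sent)
-- ('|' is bitwise or, Int.lor here, binding tighter than the comparisons).
def pvStepA (sent : List (String × String)) (st : List (String × String) × Int) (i : Int) :
    List (String × String) × Int :=
  if st.2 > 0 then (st.1, st.2 - 1)
  else if i < Int.lor 0 (i + 2) ∧ Int.lor 0 (i + 2) ≥ (sent.length : Int) then
    (st.1 ++ [PySem.List.pyGetD sent i pvPad], st.2)
  else
    let leftContext := PySem.List.pyGetD sent i pvPad
    let target := PySem.List.pyGetD sent (i + 1) pvPad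
    let rightContext := PySem.List.pyGetD sent (i + 2) pvPad
    if PySem.Str.startswith leftContext.2 "V" &&
        (target.2 == "UNK" && PySem.Str.lower target.1 == "to") && rightContext.2 == "." then
      (st.1 ++ [leftContext, (target.1, "TO"), rightContext], 2)
    else (st.1 ++ [leftContext], st.2)

def V_to_PUNC_TOTagger (sent : List (String × String)) : List (String × String) :=
  ((PySem.List.pyRange 0 (sent.length : Int) 1).foldl (pvStepA sent) ([], 0)).1

-- ===== PORT B =====
-- Source B's per-element body: retag cur iff its neighbors match
def pvRetag (prev cur nxt : String × String) : String × String :=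
  if PySem.Str.startswith prev.2 "V" && cur.2 == "UNK" && PySem.Str.lower cur.1 == "to" &&
      nxt.2 == "." then (cur.1, "TO") else cur

def V_to_PUNC_TOTagger_alt (sent : List (String × String)) : List (String × String) :=
  ((pvPad :: sent).zip (sent.zip (PySem.List.slice sent (some 1) none ++ [pvPad]))).map
    (fun p => pvRetag p.1 p.2.1 p.2.2)

-- ===== PRECONDITION & SPEC =====
def Spec_V_to_PUNC_TOTagger (sent : List (String × String)) (out : List (String × String)) : Prop := out = V_to_PUNC_TOTagger_alt sent
instance (sent : List (String × String)) (out : List (String × String)) : Decidable (Spec_V_to_PUNC_TOTagger sent out) := by unfold Spec_V_to_PUNC_TOTagger; infer_instance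

-- ===== CLAIM (what is proved, stated in full; the proofs are below) =====
def Claim_equal_V_to_PUNC_TOTagger : Prop := ∀ (sent : List (String × String)), Dom_V_to_PUNC_TOTagger sent → Spec_V_to_PUNC_TOTagger sent (V_to_PUNC_TOTagger sent)

-- ===== LEMMAS AND PROOFS =====

lemma pvZeroLor (x : Int) : Int.lor 0 x = x := by
  cases x <;> simp [Int.lor, Nat.ldiff, Nat.bitwise_zero_right]

-- the three-token condition, in A's grouping
def pvMatch (a b c : String × String) : Bool :=
  PySem.Str.startswith a.2 "V" && (b.2 == "UNK" && PySem.Str.lower b.1 == "to") && c.2 == "."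

-- common recursive characterisation of both programs
def pvRec : List (String × String) → List (String × String)
  | a :: b :: c :: rest =>
      if pvMatch a b c then a :: (b.1, "TO") :: c :: pvRec rest
      else a :: pvRec (b :: c :: rest)
  | l => l

lemma pvRec_short (l : List (String × String)) (h : l.length ≤ 2) : pvRec l = l := by
  match l with
  | [] => rfl
  | [a] => rfl
  | [a, b] => rfl
  | a :: b :: c :: t => simp at h

lemma pvRetag_eq (prev cur nxt : String × String) :
    pvRetag prev cur nxt = if pvMatch prev cur nxt then (cur.1, "TO") else cur := by
  simp [pvRetag, pvMatch, Bool.and_assoc]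

lemma pvMatch_dot (a b c : String × String) (h : a.2 = ".") : pvMatch a b c = false := by
  simp [pvMatch, h, show PySem.Chars.startswith ['.'] ['V'] = false from by decide]

lemma pvMatch_dot' (a b c : String × String) (h : b.2 = ".") : pvMatch a b c = false := by
  simp [pvMatch, h]

-- B with an explicit "previous token" context
def pvB (prev : String × String) (l : List (String × String)) : List (String × String) :=
  ((prev :: l).zip (l.zip (l.tail ++ [pvPad]))).map (fun p => pvRetag p.1 p.2.1 p.2.2)

lemma pvB_nil (prev : String × String) : pvB prev [] = [] := by simp [pvB]

lemma pvB_cons (prev x : String × String) (t : List (String × String)) :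
    pvB prev (x :: t) = pvRetag prev x (t.headD pvPad) :: pvB x t := by
  cases t <;> simp [pvB]

lemma pvRetag_pad (prev x : String × String) : pvRetag prev x pvPad = x := by
  rw [pvRetag_eq]
  simp [pvMatch, pvPad]

lemma pvB_eq_pvRec (l : List (String × String)) :
    ∀ prev, (∀ a b t, l = a :: b :: t → pvMatch prev a b = false) → pvB prev l = pvRec l := by
  induction l using pvRec.induct with
  | case1 a b c rest hm ih =>
    intro prev hnp
    have hc : c.2 = "." := by
      have h' := hm
      simp [pvMatch] at h'
      exact h'.2
    rw [pvB_cons, pvB_cons, pvB_cons]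
    rw [pvRec]
    rw [if_pos hm]
    have h1 : pvRetag prev a ((b :: c :: rest).headD pvPad) = a := by
      rw [List.headD_cons, pvRetag_eq, hnp a b _ rfl, if_neg (by simp)]
    have h2 : pvRetag a b ((c :: rest).headD pvPad) = (b.1, "TO") := by
      rw [List.headD_cons, pvRetag_eq, hm, if_pos rfl]
    have h3 : pvRetag b c (rest.headD pvPad) = c := by
      rw [pvRetag_eq, pvMatch_dot' b c _ hc, if_neg (by simp)]
    rw [h1, h2, h3, ih c (fun a' b' t' ht => pvMatch_dot c a' b' hc)]
  | case2 a b c rest hm ih =>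
    intro prev hnp
    have hm' : pvMatch a b c = false := by simpa using hm
    rw [pvB_cons, List.headD_cons, pvRetag_eq, hnp a b _ rfl, if_neg (by simp)]
    rw [pvRec, if_neg (by simp [hm'])]
    rw [ih a (by intro a' b' t' ht; cases ht; exact hm')]
  | case3 l hshape =>
    intro prev hnp
    match l, hshape with
    | [], _ => simp [pvB_nil, pvRec]
    | [a], _ =>
      rw [pvB_cons, pvB_nil, List.headD_nil, pvRetag_pad]
      rfl
    | [a, b], _ =>
      rw [pvB_cons, pvB_cons, pvB_nil, List.headD_cons, List.headD_nil, pvRetag_pad]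
      rw [pvRetag_eq, hnp a b _ rfl, if_neg (by simp)]
      rfl
    | a :: b :: c :: t, hsh => exact absurd rfl (hsh a b c t)

lemma pvGetD (sent : List (String × String)) (k : Nat) (h : k < sent.length) :
    PySem.List.pyGetD sent (k : Int) pvPad = sent[k] := by
  simp [h]

lemma pvA_loop (sent : List (String × String)) :
    ∀ (fuel k : Nat) (acc : List (String × String)),
      sent.length - k ≤ fuel → k ≤ sent.length →
      ((PySem.List.pyRange (k : Int) (sent.length : Int) 1).foldl (pvStepA sent) (acc, 0)).1 =
        acc ++ pvRec (sent.drop k) := by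
  intro fuel
  induction fuel with
  | zero =>
    intro k acc hf hk
    have hk' : k = sent.length := by omega
    subst hk'
    rw [PySem.List.pyRange_one_eq_nil (by omega), List.foldl_nil, List.drop_length]
    simp [pvRec]
  | succ fuel ih =>
    intro k acc hf hk
    by_cases hlt : k < sent.length
    · rw [PySem.List.pyRange_one_cons (by exact_mod_cast hlt), List.foldl_cons]
      by_cases hb : k + 2 ≥ sent.length
      · -- boundary: emit sent[k] and continue
        have hstep : pvStepA sent (acc, 0) (k : Int) = (acc ++ [sent[k]], 0) := by
          rw [pvStepA]
          simp only [pvZeroLor]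
          rw [if_neg (by omega), if_pos (by omega), pvGetD sent k hlt]
        rw [hstep]
        have hrest := ih (k + 1) (acc ++ [sent[k]]) (by omega) (by omega)
        push_cast at hrest ⊢
        rw [hrest]
        rw [List.drop_eq_getElem_cons hlt]
        rw [pvRec_short (sent.drop (k+1)) (by simp; omega),
          pvRec_short (sent[k] :: sent.drop (k+1)) (by simp; omega)]
        simp
      · -- interior: the full three-token window is available
        have h1 : k + 1 < sent.length := by omega
        have h2 : k + 2 < sent.length := by omega
        have e1 : ((k : Int) + 1) = (((k + 1 : Nat)) : Int) := by push_cast; ring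
        have e2 : ((k : Int) + 2) = (((k + 2 : Nat)) : Int) := by push_cast; ring
        have hdrop : sent.drop (k+1) = sent[k+1] :: sent[k+2] :: sent.drop (k+3) := by
          rw [List.drop_eq_getElem_cons h1]
          simp only [show k+1+1 = k+2 by omega]
          rw [List.drop_eq_getElem_cons h2]
        have hstep : pvStepA sent (acc, 0) (k : Int) =
            (if pvMatch sent[k] sent[k+1] sent[k+2] then
              (acc ++ [sent[k], (sent[k+1].1, "TO"), sent[k+2]], 2)
            else (acc ++ [sent[k]], 0)) := by
          rw [pvStepA]
          simp only [pvZeroLor]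
          rw [if_neg (by omega), if_neg (by omega)]
          rw [pvGetD sent k hlt, e1, pvGetD sent (k+1) h1, e2, pvGetD sent (k+2) h2]
          rfl
        rw [hstep]
        by_cases hm : pvMatch sent[k] sent[k+1] sent[k+2]
        · rw [if_pos hm]
          rw [PySem.List.pyRange_one_cons (by omega),
            show ((k : Int) + 1 + 1) = ((k : Int) + 2) by ring,
            PySem.List.pyRange_one_cons (by omega), List.foldl_cons, List.foldl_cons]
          rw [show pvStepA sent (acc ++ [sent[k], (sent[k+1].1, "TO"), sent[k+2]], 2)
              ((k : Int) + 1) = (acc ++ [sent[k], (sent[k+1].1, "TO"), sent[k+2]], 1) by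
            rw [pvStepA]; norm_num]
          rw [show pvStepA sent (acc ++ [sent[k], (sent[k+1].1, "TO"), sent[k+2]], 1)
              ((k : Int) + 2) = (acc ++ [sent[k], (sent[k+1].1, "TO"), sent[k+2]], 0) by
            rw [pvStepA]; norm_num]
          have hrest := ih (k + 3) (acc ++ [sent[k], (sent[k+1].1, "TO"), sent[k+2]]) (by omega)
            (by omega)
          push_cast at hrest ⊢
          rw [show (k : Int) + 2 + 1 = (k : Int) + 3 by ring, hrest]
          rw [List.drop_eq_getElem_cons hlt, hdrop, pvRec, if_pos hm]
          simp
        · rw [if_neg hm]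
          have hrest := ih (k + 1) (acc ++ [sent[k]]) (by omega) (by omega)
          push_cast at hrest ⊢
          rw [hrest]
          rw [List.drop_eq_getElem_cons hlt, hdrop, pvRec,
            if_neg (by simp [hm]), ← hdrop]
          simp
    · have hk' : k = sent.length := by omega
      subst hk'
      rw [PySem.List.pyRange_one_eq_nil (by omega), List.foldl_nil, List.drop_length]
      simp [pvRec]

lemma pvA_eq_pvRec (sent : List (String × String)) : V_to_PUNC_TOTagger sent = pvRec sent := by
  have h := pvA_loop sent sent.length 0 [] (by omega) (by omega)
  simpa [V_to_PUNC_TOTagger] using h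

lemma pvAlt_eq_pvB (sent : List (String × String)) :
    V_to_PUNC_TOTagger_alt sent = pvB pvPad sent := by
  simp [V_to_PUNC_TOTagger_alt, pvB, PySem.List.slice_from_one]

-- ===== VERDICT (by name: the statement is the Claim_ definition above) =====
theorem V_to_PUNC_TOTagger_spec : Claim_equal_V_to_PUNC_TOTagger := by
  intro sent _hdom
  unfold Spec_V_to_PUNC_TOTagger
  rw [pvA_eq_pvRec, pvAlt_eq_pvB]
  exact (pvB_eq_pvRec sent pvPad (by
    intro a b t ht
    simp [pvMatch, pvPad, show PySem.Chars.startswith ([] : List Char) ['V'] = false from by decide])).symm
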